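-- pv_equiv track=rewrite | github.com/akash-spectrasoln/migcockpit | api/views/expression_validation.py | _parse_function_call
-- ===== SOURCE A (Python) =====
-- from typing import Dict, List, Any, Optional
--
-- def _parse_function_call(func_name: str, start_idx: int, tokens: List[str]) -> tuple:
--     """Parse a function call and return (end_index, arguments_list, has_arithmetic_in_args)"""
--     if start_idx + 1 >= len(tokens) or tokens[start_idx + 1] != '(':
--         return (start_idx, [], False)
--
--     # Find matching closing parenthesis
--     paren_count = 0
--     arg_tokens = []
--     i = start_idx + 2  # Skip function name and opening paren
--     has_arithmetic = False
--
--     while i < len(tokens):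
--         token = tokens[i]
--
--         if token == '(':
--             paren_count += 1
--             arg_tokens.append(token)
--         elif token == ')':
--             if paren_count == 0:
--                 # Found closing paren for this function
--                 break
--             paren_count -= 1
--             arg_tokens.append(token)
--         elif token == ',' and paren_count == 0:
--             # Argument separator at top level
--             arg_tokens.append(token)
--         else:
--             arg_tokens.append(token)
--             # Check for arithmetic operators
--             if token in ['+', '-', '*', '/']:
--                 has_arithmetic = True
--
--         i += 1
--
--     # Parse arguments (split by commas at top level)
--     arguments = []
--     current_arg = []
--     paren_level = 0
--
--     for token in arg_tokens:
--         if token == '(':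
--             paren_level += 1
--             current_arg.append(token)
--         elif token == ')':
--             paren_level -= 1
--             current_arg.append(token)
--         elif token == ',' and paren_level == 0:
--             if current_arg:
--                 arguments.append(' '.join(current_arg))
--                 current_arg = []
--         else:
--             current_arg.append(token)
--
--     if current_arg:
--         arguments.append(' '.join(current_arg))
--
--     return (i, arguments, has_arithmetic)
-- ===== SOURCE B (Python) =====
-- from typing import List
--
-- def _parse_function_call(func_name: str, start_idx: int, tokens: List[str]) -> tuple:
--     """Single pass: split arguments and detect arithmetic while scanning for the closing paren."""
--     if start_idx + 1 >= len(tokens) or tokens[start_idx + 1] != '(':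
--         return (start_idx, [], False)
--
--     depth = 0
--     current_arg = []
--     arguments = []
--     has_arithmetic = False
--     i = start_idx + 2
--
--     while i < len(tokens):
--         token = tokens[i]
--         if token == '(':
--             depth += 1
--             current_arg.append(token)
--         elif token == ')':
--             if depth == 0:
--                 break
--             depth -= 1
--             current_arg.append(token)
--         elif token == ',' and depth == 0:
--             if current_arg:
--                 arguments.append(' '.join(current_arg))
--                 current_arg = []
--         else:
--             current_arg.append(token)
--             if token in ('+', '-', '*', '/'):
--                 has_arithmetic = True
--         i += 1
--
--     if current_arg:
--         arguments.append(' '.join(current_arg))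
--     return (i, arguments, has_arithmetic)
-- ===== Notes on version B (the rewrite author's own statement) =====
-- stated objective: alternative
-- what changed: A scans once to collect arg_tokens and then re-scans that list to split arguments by top-level commas; B fuses both into a single pass that maintains the current-argument buffer, the arguments list, the paren depth and the arithmetic flag directly, so the intermediate arg_tokens list and the second scan disappear.
import Mathlib
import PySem

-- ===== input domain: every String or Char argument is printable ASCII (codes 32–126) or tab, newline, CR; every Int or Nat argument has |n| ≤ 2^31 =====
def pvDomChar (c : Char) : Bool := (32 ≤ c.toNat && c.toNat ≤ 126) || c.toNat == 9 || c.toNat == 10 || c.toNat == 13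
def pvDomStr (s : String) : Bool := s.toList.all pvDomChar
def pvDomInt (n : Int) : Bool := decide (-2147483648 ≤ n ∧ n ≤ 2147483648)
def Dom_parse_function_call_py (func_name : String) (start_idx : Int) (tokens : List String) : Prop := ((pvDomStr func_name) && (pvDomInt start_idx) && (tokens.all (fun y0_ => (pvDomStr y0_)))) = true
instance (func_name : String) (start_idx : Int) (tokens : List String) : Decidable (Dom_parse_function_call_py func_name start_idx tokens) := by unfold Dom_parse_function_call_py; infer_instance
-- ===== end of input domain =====

-- B fuses A's two linear passes (token collection, then comma-splitting) into one pass that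
-- maintains the current-argument buffer and argument list directly; same cost class (alternative).

-- ===== PORT A =====
-- first while-loop of A: collect arg_tokens, track paren_count and has_arithmetic
def pvLoopA (tokens : List String) (i pc : Int) (acc : List String) (ha : Bool) :
    Int × List String × Bool :=
  if h : i < (tokens.length : Int) then
    let t := PySem.List.pyGetD tokens i ""
    if t = "(" then pvLoopA tokens (i + 1) (pc + 1) (acc ++ [t]) ha
    else if t = ")" then
      if pc = 0 then (i, acc, ha)
      else pvLoopA tokens (i + 1) (pc - 1) (acc ++ [t]) ha
    else if t = "," ∧ pc = 0 then pvLoopA tokens (i + 1) pc (acc ++ [t]) ha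
    else pvLoopA tokens (i + 1) pc (acc ++ [t])
      (ha || (t = "+" || t = "-" || t = "*" || t = "/"))
  else (i, acc, ha)
termination_by ((tokens.length : Int) - i).toNat
decreasing_by all_goals omega

-- second for-loop of A: split arg_tokens by top-level commas (state: arguments, current_arg, paren_level)
def pvSplitStep (s : List String × List String × Int) (t : String) :
    List String × List String × Int :=
  if t = "(" then (s.1, s.2.1 ++ [t], s.2.2 + 1)
  else if t = ")" then (s.1, s.2.1 ++ [t], s.2.2 - 1)
  else if t = "," ∧ s.2.2 = 0 then
    if s.2.1 ≠ [] then (s.1 ++ [PySem.Str.join " " s.2.1], [], s.2.2) else s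
  else (s.1, s.2.1 ++ [t], s.2.2)

def parse_function_call_py (func_name : String) (start_idx : Int) (tokens : List String) : Int × List String × Bool :=
  if start_idx + 1 ≥ (tokens.length : Int) ∨ PySem.List.pyGetD tokens (start_idx + 1) "" ≠ "(" then
    (start_idx, [], false)
  else
    let r := pvLoopA tokens (start_idx + 2) 0 [] false
    let s := List.foldl pvSplitStep ([], [], (0 : Int)) r.2.1
    (r.1, if s.2.1 ≠ [] then s.1 ++ [PySem.Str.join " " s.2.1] else s.1, r.2.2)

-- ===== PORT B =====
def pvFlush (args cur : List String) : List String :=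
  if cur ≠ [] then args ++ [PySem.Str.join " " cur] else args

-- B's single while-loop: state = (depth, current_arg, arguments, has_arithmetic)
def pvLoopB (tokens : List String) (i depth : Int) (cur args : List String) (ha : Bool) :
    Int × List String × Bool :=
  if h : i < (tokens.length : Int) then
    let t := PySem.List.pyGetD tokens i ""
    if t = "(" then pvLoopB tokens (i + 1) (depth + 1) (cur ++ [t]) args ha
    else if t = ")" then
      if depth = 0 then (i, pvFlush args cur, ha)
      else pvLoopB tokens (i + 1) (depth - 1) (cur ++ [t]) args ha
    else if t = "," ∧ depth = 0 then
      pvLoopB tokens (i + 1) depth [] (if cur ≠ [] then args ++ [PySem.Str.join " " cur] else args) ha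
    else pvLoopB tokens (i + 1) depth (cur ++ [t]) args
      (ha || (t = "+" || t = "-" || t = "*" || t = "/"))
  else (i, pvFlush args cur, ha)
termination_by ((tokens.length : Int) - i).toNat
decreasing_by all_goals omega

def parse_function_call_py_alt (func_name : String) (start_idx : Int) (tokens : List String) : Int × List String × Bool :=
  if start_idx + 1 ≥ (tokens.length : Int) ∨ PySem.List.pyGetD tokens (start_idx + 1) "" ≠ "(" then
    (start_idx, [], false)
  else
    pvLoopB tokens (start_idx + 2) 0 [] [] false

-- ===== PRECONDITION & SPEC =====
-- Pre_ excludes exactly the inputs where Python A raises IndexError: tokens[start_idx+1]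
-- with start_idx + 1 < -len(tokens) (both programs raise there; no returning input is excluded).
def Pre_parse_function_call_py (func_name : String) (start_idx : Int) (tokens : List String) : Prop :=
  -(tokens.length : Int) ≤ start_idx + 1

instance (func_name : String) (start_idx : Int) (tokens : List String) : Decidable (Pre_parse_function_call_py func_name start_idx tokens) := by unfold Pre_parse_function_call_py; infer_instance

def pvWitness_parse_function_call_py : String × Int × List String :=
  ("f", 0, ["f", "(", "a", ",", "b", "+", "c", ")"])

def Spec_parse_function_call_py (func_name : String) (start_idx : Int) (tokens : List String) (out : Int × List String × Bool) : Prop := out = parse_function_call_py_alt func_name start_idx tokens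
instance (func_name : String) (start_idx : Int) (tokens : List String) (out : Int × List String × Bool) : Decidable (Spec_parse_function_call_py func_name start_idx tokens out) := by unfold Spec_parse_function_call_py; infer_instance

-- ===== CLAIM (what is proved, stated in full; the proofs are below) =====
def Claim_equal_parse_function_call_py : Prop := ∀ (func_name : String) (start_idx : Int) (tokens : List String), Dom_parse_function_call_py func_name start_idx tokens → Pre_parse_function_call_py func_name start_idx tokens → Spec_parse_function_call_py func_name start_idx tokens (parse_function_call_py func_name start_idx tokens)

-- ===== LEMMAS AND PROOFS =====

-- Main invariant: running A's splitter over the tokens A has accumulated so far yields B's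
-- state (args, cur) with paren_level equal to A's paren_count; then the fused loop B agrees
-- with A's loop followed by the splitter and final flush.
theorem pvLoop_agree (tokens : List String) :
    ∀ (n : Nat) (i pc : Int) (acc : List String) (ha : Bool) (args cur : List String),
      n = ((tokens.length : Int) - i).toNat →
      List.foldl pvSplitStep ([], [], (0 : Int)) acc = (args, cur, pc) →
      (let r := pvLoopA tokens i pc acc ha
       let s := List.foldl pvSplitStep ([], [], (0 : Int)) r.2.1
       (r.1, pvFlush s.1 s.2.1, r.2.2)) = pvLoopB tokens i pc cur args ha := by
  intro n
  induction n with
  | zero =>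
    intro i pc acc ha args cur hn hfold
    have hge : ¬ i < (tokens.length : Int) := by omega
    rw [pvLoopA, pvLoopB]
    simp only [dif_neg hge, hfold]
  | succ m ih =>
    intro i pc acc ha args cur hn hfold
    rw [pvLoopA, pvLoopB]
    by_cases hlt : i < (tokens.length : Int)
    · simp only [dif_pos hlt]
      set t := PySem.List.pyGetD tokens i "" with ht
      have hstep : ∀ u, List.foldl pvSplitStep ([], [], (0 : Int)) (acc ++ [u]) =
          pvSplitStep (args, cur, pc) u := by
        intro u; rw [List.foldl_append, hfold]; rfl
      by_cases h1 : t = "("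
      · simp only [h1, reduceIte]
        exact ih (i + 1) (pc + 1) (acc ++ ["("]) ha args (cur ++ ["("]) (by omega)
          (by rw [← h1, hstep]; simp [pvSplitStep, h1])
      · by_cases h2 : t = ")"
        · simp only [h2, reduceIte]
          by_cases h0 : pc = 0
          · simp [h0, hfold]
          · simp only [if_neg h0]
            exact ih (i + 1) (pc - 1) (acc ++ [")"]) ha args (cur ++ [")"]) (by omega)
              (by rw [← h2, hstep]; simp [pvSplitStep, h1, h2])
        · by_cases h3 : t = "," ∧ pc = 0
          · obtain ⟨h3t, h3p⟩ := h3
            subst h3p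
            simp only [h3t, reduceIte]
            by_cases hc : cur = []
            · subst hc
              simp only [ne_eq, not_true_eq_false, if_neg, reduceIte]
              exact ih (i + 1) 0 (acc ++ [","]) ha args [] (by omega)
                (by rw [← h3t, hstep]; simp [pvSplitStep, h1, h2, h3t, hfold])
            · simp only [if_pos (by simpa using hc : cur ≠ [])]
              exact ih (i + 1) 0 (acc ++ [","]) ha (args ++ [PySem.Str.join " " cur]) []
                (by omega)
                (by rw [← h3t, hstep]; simp [pvSplitStep, h1, h2, h3t, hc])
          · simp only [if_neg h1, if_neg h2, if_neg h3]
            exact ih (i + 1) pc (acc ++ [t]) (ha || (t = "+" || t = "-" || t = "*" || t = "/"))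
              args (cur ++ [t]) (by omega)
              (by rw [hstep]; simp [pvSplitStep, h1, h2, h3])
    · omega

theorem pvWitness_ok :
    Dom_parse_function_call_py pvWitness_parse_function_call_py.1
      pvWitness_parse_function_call_py.2.1 pvWitness_parse_function_call_py.2.2 ∧
    Pre_parse_function_call_py pvWitness_parse_function_call_py.1
      pvWitness_parse_function_call_py.2.1 pvWitness_parse_function_call_py.2.2 := by
  constructor <;> decide

-- ===== VERDICT (by name: the statement is the Claim_ definition above) =====
theorem parse_function_call_py_spec : Claim_equal_parse_function_call_py := by
  intro func_name start_idx tokens _hDom _hPre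
  unfold Spec_parse_function_call_py parse_function_call_py parse_function_call_py_alt
  by_cases hg : start_idx + 1 ≥ (tokens.length : Int) ∨
      PySem.List.pyGetD tokens (start_idx + 1) "" ≠ "("
  · simp only [if_pos hg]
  · simp only [if_neg hg]
    exact pvLoop_agree tokens (((tokens.length : Int) - (start_idx + 2)).toNat)
      (start_idx + 2) 0 [] false [] [] rfl rfl
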